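-- pv_equiv track=rewrite | github.com/ahmedxomar101/trovacasa | pipeline/src/scoring/neighborhood.py | _match_zone
-- ===== SOURCE A (Python) =====
-- def _match_zone(
--     address: str | None,
--     macrozone: str | None,
--     zone_map: dict[str, str],
--     default_tier: str,
-- ) -> tuple[str | None, str]:
--     """Find the best matching zone via substring matching.
--
--     Prefers longer zone names (more specific matches).
--     Returns (matched_zone_name, tier).
--     """
--     search_text = ""
--     if address:
--         search_text += " " + address.lower()
--     if macrozone:
--         search_text += " " + macrozone.lower()
--
--     if not search_text.strip():
--         return None, default_tier
--
--     # Sort by length descending for most-specific match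
--     sorted_zones = sorted(
--         zone_map.keys(), key=len, reverse=True
--     )
--
--     for zone in sorted_zones:
--         if zone in search_text:
--             return zone, zone_map[zone]
--
--     return None, default_tier
-- ===== SOURCE B (Python) =====
-- def _match_zone(
--     address,
--     macrozone,
--     zone_map,
--     default_tier,
-- ):
--     """One pass over zone_map, keeping the longest matching zone (first wins on ties)."""
--     search_text = ""
--     if address:
--         search_text += " " + address.lower()
--     if macrozone:
--         search_text += " " + macrozone.lower()
--
--     if not search_text.strip():
--         return None, default_tier
--
--     best_zone, best_tier, best_len = None, default_tier, -1
--     for zone, tier in zone_map.items():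
--         if len(zone) > best_len and zone in search_text:
--             best_zone, best_tier, best_len = zone, tier, len(zone)
--     return best_zone, best_tier
-- ===== Notes on version B (the rewrite author's own statement) =====
-- stated objective: simpler
-- what changed: Replaced the length-descending sort of all zone keys plus first-match scan by a single pass over zone_map.items() keeping the longest matching zone (strict > preserves the stable sort's first-among-longest tie-break).
import Mathlib
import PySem

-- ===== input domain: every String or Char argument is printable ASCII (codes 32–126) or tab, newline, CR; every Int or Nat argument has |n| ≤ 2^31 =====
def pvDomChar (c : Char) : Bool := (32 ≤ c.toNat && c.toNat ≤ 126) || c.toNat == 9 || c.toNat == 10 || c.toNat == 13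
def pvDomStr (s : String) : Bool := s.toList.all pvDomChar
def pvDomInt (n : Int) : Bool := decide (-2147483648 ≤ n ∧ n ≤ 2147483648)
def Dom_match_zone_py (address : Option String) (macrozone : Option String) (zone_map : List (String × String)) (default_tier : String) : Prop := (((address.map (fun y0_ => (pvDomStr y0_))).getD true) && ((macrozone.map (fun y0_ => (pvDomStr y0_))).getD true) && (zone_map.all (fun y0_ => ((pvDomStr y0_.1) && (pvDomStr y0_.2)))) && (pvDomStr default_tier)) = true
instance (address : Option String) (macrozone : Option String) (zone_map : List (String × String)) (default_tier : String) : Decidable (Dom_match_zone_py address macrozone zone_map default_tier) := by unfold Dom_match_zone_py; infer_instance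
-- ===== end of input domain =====

-- B replaces A's length-descending sort + first-match scan by a single pass keeping the
-- longest matching zone (objective: simpler).

-- shared helper: the search_text both Pythons build identically (" " + lower when truthy)
def pvSearchText (address : Option String) (macrozone : Option String) : List Char :=
  let search_text : List Char := []
  let search_text :=
    match address with
    | some a => if a.toList ≠ [] then search_text ++ (' ' :: PySem.Chars.lower a.toList) else search_text
    | none => search_text
  match macrozone with
  | some m => if m.toList ≠ [] then search_text ++ (' ' :: PySem.Chars.lower m.toList) else search_text
  | none => search_text

-- ===== PORT A =====
def match_zone_py (address : Option String) (macrozone : Option String) (zone_map : List (String × String)) (default_tier : String) : Option String × String :=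
  let search_text := pvSearchText address macrozone
  if PySem.Chars.strip search_text = [] then (none, default_tier)
  else
    let d := PySem.Dict.ofList zone_map
    let sorted_zones := PySem.List.sorted d.keys (fun z => z.toList.length) true
    -- 'for zone in sorted_zones: if zone in search_text: return …' = find?
    match sorted_zones.find? (fun z => PySem.Chars.isIn z.toList search_text) with
    | some zone => (some zone, d.getD zone default_tier)  -- zone ∈ d.keys, so zone_map[zone] cannot raise; the default is unreachable
    | none => (none, default_tier)

-- ===== PORT B =====
def match_zone_py_alt (address : Option String) (macrozone : Option String) (zone_map : List (String × String)) (default_tier : String) : Option String × String :=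
  let search_text := pvSearchText address macrozone
  if PySem.Chars.strip search_text = [] then (none, default_tier)
  else
    let r := (PySem.Dict.ofList zone_map).items.foldl
      (fun acc q =>
        if decide (((q.1.toList.length : Int)) > acc.2.2) && PySem.Chars.isIn q.1.toList search_text
        then (some q.1, q.2, ((q.1.toList.length : Int)))
        else acc)
      (none, default_tier, -1)
    (r.1, r.2.1)

-- ===== PRECONDITION & SPEC =====
def Spec_match_zone_py (address : Option String) (macrozone : Option String) (zone_map : List (String × String)) (default_tier : String) (out : Option String × String) : Prop := out = match_zone_py_alt address macrozone zone_map default_tier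
instance (address : Option String) (macrozone : Option String) (zone_map : List (String × String)) (default_tier : String) (out : Option String × String) : Decidable (Spec_match_zone_py address macrozone zone_map default_tier out) := by unfold Spec_match_zone_py; infer_instance

-- ===== CLAIM (what is proved, stated in full; the proofs are below) =====
def Claim_equal_match_zone_py : Prop := ∀ (address : Option String) (macrozone : Option String) (zone_map : List (String × String)) (default_tier : String), Dom_match_zone_py address macrozone zone_map default_tier → Spec_match_zone_py address macrozone zone_map default_tier (match_zone_py address macrozone zone_map default_tier)

-- ===== LEMMAS AND PROOFS =====

-- find? over a key-descending list after a stable insertion of z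
theorem pv_find?_insertBy {α : Type} (p : α → Bool) (key : α → Nat) (z : α) (ss : List α)
    (hs : ss.Pairwise (fun a b => key b ≤ key a)) :
    (PySem.List.insertBy (fun a b => decide (key b < key a)) z ss).find? p =
      if p z then
        match ss.find? p with
        | some m => if key z ≤ key m then some m else some z
        | none => some z
      else ss.find? p := by
  induction ss with
  | nil => cases hpz : p z <;> simp [PySem.List.insertBy, List.find?, hpz]
  | cons y ys ih =>
    have hy : ∀ m ∈ ys, key m ≤ key y := (List.pairwise_cons.mp hs).1
    have hys : ys.Pairwise (fun a b => key b ≤ key a) := (List.pairwise_cons.mp hs).2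
    by_cases hlt : key y < key z
    · rw [show PySem.List.insertBy (fun a b => decide (key b < key a)) z (y :: ys)
          = z :: y :: ys from by simp [PySem.List.insertBy, hlt]]
      cases hpz : p z
      · simp [List.find?, hpz]
      · have hz : List.find? p (z :: y :: ys) = some z := by simp [List.find?, hpz]
        rw [hz, if_pos rfl]
        cases hF : List.find? p (y :: ys) with
        | none => rfl
        | some m =>
          have hm : m ∈ y :: ys := List.mem_of_find?_eq_some hF
          have hml : key m ≤ key y := by
            rcases List.mem_cons.mp hm with h | h
            · rw [h]
            · exact hy m h
          show some z = if key z ≤ key m then some m else some z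
          rw [if_neg (by omega)]
    · rw [show PySem.List.insertBy (fun a b => decide (key b < key a)) z (y :: ys)
          = y :: PySem.List.insertBy (fun a b => decide (key b < key a)) z ys from by
            simp [PySem.List.insertBy, hlt]]
      cases hpy : p y
      · have hstep : List.find? p (y :: PySem.List.insertBy (fun a b => decide (key b < key a)) z ys)
            = List.find? p (PySem.List.insertBy (fun a b => decide (key b < key a)) z ys) := by
          simp [List.find?, hpy]
        have hstep2 : List.find? p (y :: ys) = List.find? p ys := by simp [List.find?, hpy]
        rw [hstep, hstep2, ih hys]
      · have h1 : List.find? p (y :: ys) = some y := by simp [List.find?, hpy]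
        have h2 : List.find? p (y :: PySem.List.insertBy (fun a b => decide (key b < key a)) z ys)
            = some y := by simp [List.find?, hpy]
        rw [h1, h2]
        cases hpz : p z
        · rw [if_neg (by simp)]
        · rw [if_pos rfl]
          show some y = if key z ≤ key y then some y else some z
          rw [if_pos (by omega)]

-- the main correspondence: A's first match in the stable descending sort of the keys
-- is exactly B's fold result, over any association list l
theorem pv_main (st : List Char) (dft : String) (l : List (String × String)) :
    (match (PySem.List.sorted (l.map Prod.fst) (fun z => z.toList.length) true).find?
        (fun z => PySem.Chars.isIn z.toList st) with
      | none =>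
          l.foldl (fun acc q =>
            if decide (((q.1.toList.length : Int)) > acc.2.2) && PySem.Chars.isIn q.1.toList st
            then (some q.1, q.2, ((q.1.toList.length : Int))) else acc) (none, dft, -1)
            = (none, dft, -1)
      | some z => ∃ t, (z, t) ∈ l ∧
          l.foldl (fun acc q =>
            if decide (((q.1.toList.length : Int)) > acc.2.2) && PySem.Chars.isIn q.1.toList st
            then (some q.1, q.2, ((q.1.toList.length : Int))) else acc) (none, dft, -1)
            = (some z, t, ((z.toList.length : Int)))) := by
  induction l using List.reverseRecOn with
  | nil => simp [PySem.List.sorted]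
  | append_singleton l q ih =>
    have hsorted : PySem.List.sorted ((l ++ [q]).map Prod.fst) (fun z => z.toList.length) true
        = PySem.List.insertBy (fun a b => decide (b.toList.length < a.toList.length)) q.1
            (PySem.List.sorted (l.map Prod.fst) (fun z => z.toList.length) true) := by
      rw [PySem.List.sorted_rev_eq_foldl_insertBy, PySem.List.sorted_rev_eq_foldl_insertBy]
      simp [List.foldl_append]
    rw [hsorted, List.foldl_append,
      pv_find?_insertBy (fun z => PySem.Chars.isIn z.toList st) (fun z => z.toList.length) q.1
        (PySem.List.sorted (l.map Prod.fst) (fun z => z.toList.length) true)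
        (PySem.List.sorted_pairwise_rev (l.map Prod.fst) (fun z => z.toList.length))]
    simp only [List.foldl_cons, List.foldl_nil]
    cases hpz : PySem.Chars.isIn q.1.toList st
    · simp only [Bool.and_false, Bool.false_eq_true, if_false]
      cases hF : (PySem.List.sorted (l.map Prod.fst) (fun z => z.toList.length) true).find?
          (fun z => PySem.Chars.isIn z.toList st) with
      | none => rw [hF] at ih; exact ih
      | some z =>
        rw [hF] at ih
        obtain ⟨t, hmem, heq⟩ := ih
        exact ⟨t, List.mem_append_left _ hmem, heq⟩
    · rw [if_pos rfl]
      cases hF : (PySem.List.sorted (l.map Prod.fst) (fun z => z.toList.length) true).find?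
          (fun z => PySem.Chars.isIn z.toList st) with
      | none =>
        rw [hF] at ih
        rw [ih]
        have : (decide (((q.1.toList.length : Int)) > (-1 : Int))) = true := by
          simp; omega
        simp only [this, Bool.true_and, if_true]
        exact ⟨q.2, by simp, rfl⟩
      | some m =>
        rw [hF] at ih
        obtain ⟨t, hmem, heq⟩ := ih
        rw [heq]
        by_cases hle : q.1.toList.length ≤ m.toList.length
        · have : (decide (((q.1.toList.length : Int)) > ((m.toList.length : Int)))) = false := by
            simp only [decide_eq_false_iff_not, gt_iff_lt, not_lt]
            exact_mod_cast hle
          simp only [if_pos hle, this, Bool.false_and, Bool.false_eq_true, if_false]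
          exact ⟨t, List.mem_append_left _ hmem, rfl⟩
        · have : (decide (((q.1.toList.length : Int)) > ((m.toList.length : Int)))) = true := by
            simp only [decide_eq_true_eq, gt_iff_lt]
            exact_mod_cast Nat.lt_of_not_le hle
          simp only [if_neg hle, this, Bool.true_and, if_true]
          exact ⟨q.2, by simp, rfl⟩

-- ===== VERDICT (by name: the statement is the Claim_ definition above) =====
theorem match_zone_py_spec : Claim_equal_match_zone_py := by
  intro address macrozone zone_map default_tier _
  unfold Spec_match_zone_py match_zone_py match_zone_py_alt
  by_cases hstrip : PySem.Chars.strip (pvSearchText address macrozone) = []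
  · simp [hstrip]
  · simp only [if_neg hstrip]
    have hkeys : (PySem.Dict.ofList zone_map).keys = (PySem.Dict.ofList zone_map).items.map Prod.fst := rfl
    have := pv_main (pvSearchText address macrozone) default_tier (PySem.Dict.ofList zone_map).items
    rw [hkeys]
    cases hF : (PySem.List.sorted ((PySem.Dict.ofList zone_map).items.map Prod.fst)
        (fun z => z.toList.length) true).find?
        (fun z => PySem.Chars.isIn z.toList (pvSearchText address macrozone)) with
    | none =>
      rw [hF] at this
      rw [this]
    | some zone =>
      rw [hF] at this
      obtain ⟨t, hmem, heq⟩ := this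
      rw [heq]
      have := PySem.Dict.getD_of_mem_items (PySem.Dict.ofList zone_map) hmem
        (PySem.Dict.nodup_keys_ofList zone_map) default_tier
      simp [this]
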